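-- pv_equiv track=rewrite | github.com/daniel-saeedi/DataStructureAlgorithm | CA1/Question2.py | palindrome_exists
-- ===== SOURCE A (Python) =====
-- def is_palindrome(s):
--     return s == s[::-1]
--
-- def palindrome_exists(string) :
--     characters = set()
--     found = False
--     for char in string :
--         if not char in characters :
--             characters.add(char)
--             j = 0
--             while j < len(string) + 1:
--                 new_string = string[:j] + char + string[j:]
--                 if is_palindrome(new_string) :
--                     found = True
--                     break
--                 j += 1
--     return found
-- ===== SOURCE B (Python) =====
-- # Single pass over insertion positions: the inserted character is forced by its
-- # mirror in the would-be palindrome, so the loop over distinct characters disappears.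
-- def palindrome_exists(string):
--     if not string:
--         return False
--     n = len(string)
--     for j in range(n + 1):
--         m = n - j  # mirror of the inserted position in the length-(n+1) result
--         if m < j:
--             c = string[m]
--         elif m > j:
--             c = string[m - 1]
--         else:
--             c = string[0]
--         t = string[:j] + c + string[j:]
--         if t == t[::-1]:
--             return True
--     return False
-- ===== Notes on version B (the rewrite author's own statement) =====
-- stated objective: faster
-- what changed: A tries every distinct character of the string at every insertion position (set-guarded nested loops); B makes a single pass over the insertion positions, computing for each position the one character that its mirror in the would-be palindrome forces (string[0] for the exact middle), so the loop over characters disappears.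
import Mathlib
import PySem

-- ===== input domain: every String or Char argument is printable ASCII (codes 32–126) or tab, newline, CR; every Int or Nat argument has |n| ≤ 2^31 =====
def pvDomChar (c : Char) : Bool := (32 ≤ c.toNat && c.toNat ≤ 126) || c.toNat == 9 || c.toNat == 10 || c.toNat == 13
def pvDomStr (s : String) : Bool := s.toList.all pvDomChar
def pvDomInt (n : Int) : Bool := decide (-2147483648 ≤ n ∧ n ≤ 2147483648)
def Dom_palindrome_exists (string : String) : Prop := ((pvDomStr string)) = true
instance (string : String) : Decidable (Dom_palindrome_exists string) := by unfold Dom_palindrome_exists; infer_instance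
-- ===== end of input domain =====

-- B replaces A's loop over the distinct characters by a single loop over insertion
-- positions (the inserted character is forced by its mirror), removing one nesting level.

-- ===== PORT A =====
def is_palindrome (s : List Char) : Bool :=
  s == (PySem.List.slice? s none none (-1)).getD []

def innerLoopA (string : List Char) (char : Char) (j : Nat) : Bool :=
  if j < string.length + 1 then
    if is_palindrome (PySem.List.slice string none (some (j : Int)) ++
        char :: PySem.List.slice string (some (j : Int)) none) then
      true
    else innerLoopA string char (j + 1)
  else false
termination_by string.length + 1 - j

def palindrome_exists (string : String) : Bool :=
  (string.toList.foldl
    (fun (st : PySem.Set Char × Bool) char =>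
      if !(PySem.Set.contains st.1 char) then
        (PySem.Set.add st.1 char,
         if innerLoopA string.toList char 0 then true else st.2)
      else st)
    (PySem.Set.empty, false)).2

-- ===== PORT B =====
def palindrome_exists_alt (string : String) : Bool :=
  let s := string.toList
  if s.isEmpty then false
  else
    let n := s.length
    (List.range (n + 1)).any (fun j =>
      let m := n - j
      let c := if m < j then s.getD m 'a'
               else if j < m then s.getD (m - 1) 'a'
               else s.getD 0 'a'
      let t := s.take j ++ c :: s.drop j
      t == t.reverse)

-- ===== PRECONDITION & SPEC =====
def Spec_palindrome_exists (string : String) (out : Bool) : Prop := out = palindrome_exists_alt string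
instance (string : String) (out : Bool) : Decidable (Spec_palindrome_exists string out) := by unfold Spec_palindrome_exists; infer_instance

-- ===== CLAIM (what is proved, stated in full; the proofs are below) =====
def Claim_equal_palindrome_exists : Prop := ∀ (string : String), Dom_palindrome_exists string → Spec_palindrome_exists string (palindrome_exists string)

-- ===== LEMMAS AND PROOFS =====

def insAt (s : List Char) (c : Char) (k : Nat) : List Char := s.take k ++ c :: s.drop k

def forcedChar (s : List Char) (j : Nat) : Char :=
  if s.length - j < j then s.getD (s.length - j) 'a'
  else if j < s.length - j then s.getD (s.length - j - 1) 'a'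
  else s.getD 0 'a'

theorem insAt_length (s : List Char) (c : Char) (k : Nat) :
    (insAt s c k).length = s.length + 1 := by
  simp [insAt]

theorem insAt_get_lt (s : List Char) (c : Char) (k i : Nat) (_hk : k ≤ s.length) (hi : i < k)
    (h1 : i < (insAt s c k).length) (h2 : i < s.length) :
    (insAt s c k)[i] = s[i] := by
  unfold insAt
  rw [List.getElem_append_left (by simp; omega)]
  exact List.getElem_take

theorem insAt_get_self (s : List Char) (c : Char) (k : Nat) (hk : k ≤ s.length)
    (h1 : k < (insAt s c k).length) :
    (insAt s c k)[k] = c := by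
  unfold insAt
  rw [List.getElem_append_right (by simp)]
  simp [Nat.min_eq_left hk]


theorem insAt_get_gt (s : List Char) (c : Char) (k i : Nat) (hk : k ≤ s.length) (hi : k < i)
    (_hin : i ≤ s.length) (h1 : i < (insAt s c k).length) (h2 : i - 1 < s.length) :
    (insAt s c k)[i] = s[i - 1] := by
  unfold insAt
  rw [List.getElem_append_right (by simp; omega)]
  have hmin : (List.take k s).length = k := by simp; omega
  rw [List.getElem_cons]
  split
  · omega
  · rw [List.getElem_drop]
    congr 1
    simp at hmin ⊢; omega

theorem pal_get (t : List Char) (h : t = t.reverse) (i : Nat) (hi : i < t.length)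
    (h2 : t.length - 1 - i < t.length) :
    t[i] = t[t.length - 1 - i] := by
  rw [List.getElem_of_eq h hi, List.getElem_reverse]

theorem is_palindrome_eq (t : List Char) : is_palindrome t = (t == t.reverse) := by
  simp [is_palindrome, PySem.List.slice?_none_none_neg_one]

theorem inner_iff (s : List Char) (c : Char) : ∀ (fuel j : Nat), s.length + 1 - j ≤ fuel →
    (innerLoopA s c j = true ↔ ∃ k, j ≤ k ∧ k ≤ s.length ∧ insAt s c k = (insAt s c k).reverse) := by
  intro fuel
  induction fuel with
  | zero =>
    intro j hj
    rw [innerLoopA]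
    simp only [if_neg (by omega : ¬ j < s.length + 1)]
    constructor
    · intro h; exact absurd h (by simp)
    · rintro ⟨k, h1, h2, _⟩; omega
  | succ m ih =>
    intro j hj
    rw [innerLoopA]
    by_cases hlt : j < s.length + 1
    · simp only [if_pos hlt, is_palindrome_eq, PySem.List.slice_to_natCast,
        PySem.List.slice_from_natCast]
      by_cases hp : insAt s c j = (insAt s c j).reverse
      · have : ((List.take j s ++ c :: List.drop j s) == (List.take j s ++ c :: List.drop j s).reverse) = true := by
          simpa [insAt] using hp
        rw [if_pos this]
        simp only [true_iff]
        exact ⟨j, le_refl j, by omega, hp⟩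
      · have : ((List.take j s ++ c :: List.drop j s) == (List.take j s ++ c :: List.drop j s).reverse) = false := by
          simpa [insAt] using hp
        rw [this, if_neg (by simp)]
        rw [ih (j + 1) (by omega)]
        constructor
        · rintro ⟨k, h1, h2, h3⟩; exact ⟨k, by omega, h2, h3⟩
        · rintro ⟨k, h1, h2, h3⟩
          refine ⟨k, by
            rcases Nat.lt_or_ge j k with h | h
            · omega
            · exfalso; have : k = j := by omega
              exact hp (this ▸ h3), h2, h3⟩
    · simp only [if_neg hlt]
      constructor
      · intro h; exact absurd h (by simp)
      · rintro ⟨k, h1, h2, _⟩; omega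

theorem foldA (s : List Char) : ∀ (l : List Char) (S : PySem.Set Char) (f : Bool),
    (l.foldl
      (fun (st : PySem.Set Char × Bool) char =>
        if !(PySem.Set.contains st.1 char) then
          (PySem.Set.add st.1 char,
           if innerLoopA s char 0 then true else st.2)
        else st)
      (S, f)).2 = (f || l.any (fun c => !PySem.Set.contains S c && innerLoopA s c 0)) := by
  intro l
  induction l with
  | nil => intro S f; simp
  | cons c rest ih =>
    intro S f
    rw [List.foldl_cons, List.any_cons]
    by_cases hc : PySem.Set.contains S c = true
    · simp only [hc, Bool.not_true, Bool.false_eq_true, if_false, Bool.false_and, Bool.false_or]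
      exact ih S f
    · have hc' : PySem.Set.contains S c = false := by simpa using hc
      simp only [hc', Bool.not_false, if_true, Bool.true_and]
      rw [ih]
      by_cases hi : innerLoopA s c 0 = true
      · simp [hi]
      · have hi' : innerLoopA s c 0 = false := by simpa using hi
        simp only [hi', Bool.false_eq_true, if_false, Bool.false_or]
        congr 1
        apply PySem.List.any_congr_mem
        intro d _
        by_cases hd : d = c
        · subst hd; simp [hi']
        · have hSd : PySem.Set.contains (PySem.Set.add S c) d = PySem.Set.contains S d := by
            cases hmem : PySem.Set.contains S d with
            | true =>
              rw [PySem.Set.contains_iff] at hmem ⊢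
              rw [PySem.Set.mem_add]
              exact Or.inl hmem
            | false =>
              have hnot : ¬ d ∈ S := by
                intro h
                have := (PySem.Set.contains_iff S d).mpr h
                rw [hmem] at this
                exact absurd this (by simp)
              have : ¬ d ∈ PySem.Set.add S c := by
                rw [PySem.Set.mem_add]
                rintro (h | h)
                · exact hnot h
                · exact hd h
              rw [← Bool.not_eq_true, PySem.Set.contains_iff]
              exact this
          rw [hSd]

theorem A_iff (str : String) : palindrome_exists str = true ↔
    ∃ c ∈ str.toList, ∃ k, k ≤ str.toList.length ∧
      insAt str.toList c k = (insAt str.toList c k).reverse := by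
  unfold palindrome_exists
  rw [foldA]
  simp only [Bool.false_or, List.any_eq_true, Bool.and_eq_true, Bool.not_eq_true']
  constructor
  · rintro ⟨c, hc, _, h⟩
    rw [inner_iff _ _ (str.toList.length + 1) 0 (by omega)] at h
    obtain ⟨k, _, hk, hp⟩ := h
    exact ⟨c, hc, k, hk, hp⟩
  · rintro ⟨c, hc, k, hk, hp⟩
    refine ⟨c, hc, ?_, ?_⟩
    · simp [PySem.Set.empty]
    · rw [inner_iff _ _ (str.toList.length + 1) 0 (by omega)]
      exact ⟨k, Nat.zero_le _, hk, hp⟩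

theorem B_iff (str : String) : palindrome_exists_alt str = true ↔
    (str.toList ≠ [] ∧ ∃ j, j ≤ str.toList.length ∧
      insAt str.toList (forcedChar str.toList j) j
        = (insAt str.toList (forcedChar str.toList j) j).reverse) := by
  unfold palindrome_exists_alt
  cases hE : str.toList.isEmpty with
  | true =>
    have h0 : str.toList = [] := by simpa using hE
    simp [h0]
  | false =>
    have hne : str.toList ≠ [] := by simpa using hE
    simp only [hE, Bool.false_eq_true, if_false, List.any_eq_true, List.mem_range,
      beq_iff_eq, forcedChar, insAt, ne_eq, hne, not_false_eq_true, true_and]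
    constructor
    · rintro ⟨j, hj, hp⟩
      exact ⟨j, by omega, hp⟩
    · rintro ⟨j, hj, hp⟩
      exact ⟨j, by omega, hp⟩

theorem insAt_agree (s : List Char) (c c' : Char) (k i : Nat) (hk : k ≤ s.length)
    (hi : i ≤ s.length) (hik : i ≠ k)
    (h1 : i < (insAt s c k).length) (h2 : i < (insAt s c' k).length) :
    (insAt s c k)[i] = (insAt s c' k)[i] := by
  rcases Nat.lt_or_ge i k with h | h
  · rw [insAt_get_lt s c k i hk h h1 (by omega), insAt_get_lt s c' k i hk h h2 (by omega)]
  · have hgt : k < i := by omega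
    rw [insAt_get_gt s c k i hk hgt hi h1 (by omega),
        insAt_get_gt s c' k i hk hgt hi h2 (by omega)]

theorem forced_of_pal (s : List Char) (c : Char) (k : Nat) (hc : c ∈ s) (hk : k ≤ s.length)
    (hp : insAt s c k = (insAt s c k).reverse) :
    insAt s (forcedChar s k) k = (insAt s (forcedChar s k) k).reverse := by
  have hn : 0 < s.length := List.length_pos_of_mem hc
  have hlen : (insAt s c k).length = s.length + 1 := insAt_length s c k
  rcases lt_trichotomy (s.length - k) k with hm | hm | hm
  · -- inserted left of centre: the char is forced to be s[s.length - k]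
    have hmk : s.length - k < s.length := by omega
    have e1 : (insAt s c k)[s.length - k]'(by omega) = s[s.length - k]'hmk :=
      insAt_get_lt s c k (s.length - k) hk hm (by omega) hmk
    have e2 : (insAt s c k)[s.length - k]'(by omega)
        = (insAt s c k)[(insAt s c k).length - 1 - (s.length - k)]'(by omega) :=
      pal_get _ hp _ (by omega) (by omega)
    have hidx : (insAt s c k).length - 1 - (s.length - k) = k := by omega
    simp only [hidx] at e2
    have e3 : (insAt s c k)[k]'(by omega) = c := insAt_get_self s c k hk (by omega)
    have hforced : forcedChar s k = c := by
      rw [forcedChar, if_pos hm, List.getD_eq_getElem _ _ hmk]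
      rw [← e1, e2, e3]
    rw [hforced]; exact hp
  · -- middle insertion: any character from s works; B uses s[0]
    have hforced : forcedChar s k = s[0]'hn := by
      rw [forcedChar, if_neg (by omega), if_neg (by omega), List.getD_eq_getElem _ _ hn]
    set c0 := s[0]'hn with hc0
    have hlen' : (insAt s c0 k).length = s.length + 1 := insAt_length s c0 k
    rw [hforced]
    apply List.ext_getElem (by simp)
    intro i hi1 hi2
    rw [List.getElem_reverse]
    have hile : i ≤ s.length := by omega
    have hidx : (insAt s c0 k).length - 1 - i = s.length - i := by omega
    simp only [hidx]
    by_cases hik : i = k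
    · have : s.length - i = i := by omega
      simp only [this]
    · have hik' : s.length - i ≠ k := by omega
      have hle' : s.length - i ≤ s.length := by omega
      calc (insAt s c0 k)[i]'hi1
          = (insAt s c k)[i]'(by omega) := insAt_agree s c0 c k i hk hile hik _ _
        _ = (insAt s c k)[(insAt s c k).length - 1 - i]'(by omega) :=
            pal_get _ hp _ (by omega) (by omega)
        _ = (insAt s c k)[s.length - i]'(by omega) := by
            have : (insAt s c k).length - 1 - i = s.length - i := by omega
            simp only [this]
        _ = (insAt s c0 k)[s.length - i]'(by omega) :=
            insAt_agree s c c0 k (s.length - i) hk hle' hik' _ _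
  · -- inserted right of centre: the char is forced to be s[s.length - k - 1]
    have hm1 : 1 ≤ s.length - k := by omega
    have hmk : s.length - k - 1 < s.length := by omega
    have e1 : (insAt s c k)[s.length - k]'(by omega) = s[s.length - k - 1]'hmk :=
      insAt_get_gt s c k (s.length - k) hk hm (by omega) (by omega) hmk
    have e2 : (insAt s c k)[s.length - k]'(by omega)
        = (insAt s c k)[(insAt s c k).length - 1 - (s.length - k)]'(by omega) :=
      pal_get _ hp _ (by omega) (by omega)
    have hidx : (insAt s c k).length - 1 - (s.length - k) = k := by omega
    simp only [hidx] at e2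
    have e3 : (insAt s c k)[k]'(by omega) = c := insAt_get_self s c k hk (by omega)
    have hforced : forcedChar s k = c := by
      rw [forcedChar, if_neg (by omega), if_pos hm, List.getD_eq_getElem _ _ hmk]
      rw [← e1, e2, e3]
    rw [hforced]; exact hp

theorem forced_mem (s : List Char) (j : Nat) (hs : s ≠ []) : forcedChar s j ∈ s := by
  have hn : 0 < s.length := List.length_pos_iff.mpr hs
  rw [forcedChar]
  split_ifs with h1 h2
  · rw [List.getD_eq_getElem _ _ (by omega)]; exact List.getElem_mem _
  · rw [List.getD_eq_getElem _ _ (by omega)]; exact List.getElem_mem _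
  · rw [List.getD_eq_getElem _ _ hn]; exact List.getElem_mem _

theorem main_eq (str : String) : palindrome_exists str = palindrome_exists_alt str := by
  rw [Bool.eq_iff_iff, A_iff, B_iff]
  constructor
  · rintro ⟨c, hc, k, hk, hp⟩
    exact ⟨List.ne_nil_of_mem hc, k, hk, forced_of_pal str.toList c k hc hk hp⟩
  · rintro ⟨hne, j, hj, hp⟩
    exact ⟨forcedChar str.toList j, forced_mem str.toList j hne, j, hj, hp⟩

-- ===== VERDICT (by name: the statement is the Claim_ definition above) =====
theorem palindrome_exists_spec : Claim_equal_palindrome_exists := by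
  intro string _
  unfold Spec_palindrome_exists
  exact main_eq string
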